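-- pv_equiv track=rewrite | github.com/show2214/atcoder | abc088b_CardGameForTwo.py | calc
-- ===== SOURCE A (Python) =====
-- def calc(cards, alice, bob, is_alice):
--     card = max(cards)
--     if is_alice:
--         alice += card
--     else:
--         bob += card
--     cards.remove(card)
--     if len(cards) != 0:
--         return calc(cards, alice, bob, not is_alice)
--     return alice - bob
-- ===== SOURCE B (Python) =====
-- # Sort once, then accumulate the alternating score difference in one pass
-- # (diff = c - diff over the ascending order builds the descending alternating sum
-- # back-to-front). Unlike A, B does not mutate `cards`.
-- def calc(cards, alice, bob, is_alice):
--     diff = 0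
--     for c in sorted(cards):
--         diff = c - diff
--     return alice - bob + (diff if is_alice else -diff)
-- ===== Notes on version B (the rewrite author's own statement) =====
-- stated objective: faster
-- what changed: Replaces the recursive take-max-and-remove simulation (a linear max scan plus a remove per turn) by a single sort followed by one back-to-front alternating-sum pass; B also does not mutate the caller's list.
import Mathlib
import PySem

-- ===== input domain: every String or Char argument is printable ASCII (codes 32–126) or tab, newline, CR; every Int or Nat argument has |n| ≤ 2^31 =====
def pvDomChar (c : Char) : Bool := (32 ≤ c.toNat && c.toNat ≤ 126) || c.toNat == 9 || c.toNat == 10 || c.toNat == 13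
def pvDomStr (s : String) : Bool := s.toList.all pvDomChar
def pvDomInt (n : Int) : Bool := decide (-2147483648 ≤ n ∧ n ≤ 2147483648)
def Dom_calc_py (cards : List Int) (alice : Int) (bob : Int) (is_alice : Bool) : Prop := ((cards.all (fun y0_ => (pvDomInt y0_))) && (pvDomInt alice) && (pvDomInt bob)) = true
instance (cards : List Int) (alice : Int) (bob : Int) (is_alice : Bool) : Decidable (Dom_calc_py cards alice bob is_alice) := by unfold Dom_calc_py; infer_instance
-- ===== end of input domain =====

-- B replaces A's recursive take-max-and-remove with sort + one alternating-sum pass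
-- (asymptotically faster); A mutates `cards` in place, B does not — the claim is
-- about return values only. A raises on empty `cards` (excluded by Pre_).


-- ===== PORT A =====
-- card = max(cards); add to the player to move; cards.remove(card); recurse while nonempty.
-- max([]) raises ValueError (none branch, excluded by Pre_); remove cannot fail since card ∈ cards.
def calc_py (cards : List Int) (alice : Int) (bob : Int) (is_alice : Bool) : Int :=
  match hm : PySem.List.max? cards (fun x => x) with
  | none => 0  -- unreachable under Pre_calc_py: max([]) raises
  | some card =>
    match hr : PySem.List.remove? cards card with
    | none => 0  -- unreachable: card ∈ cards
    | some rest =>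
      -- alice'/bob' are Python's updated alice/bob (computed before the remove there;
      -- both are pure, so the value is unchanged)
      let alice' := if is_alice then alice + card else alice
      let bob' := if is_alice then bob else bob + card
      if rest.length ≠ 0 then calc_py rest alice' bob' (!is_alice)
      else alice' - bob'
termination_by cards.length
decreasing_by
  have hmem : card ∈ cards := by
    by_contra h
    rw [(PySem.List.remove?_eq_none_iff cards card).mpr h] at hr
    simp at hr
  rw [PySem.List.remove?_eq_some_erase cards card hmem] at hr
  cases hr
  have h1 : (cards.erase card).length = cards.length - 1 := List.length_erase_of_mem hmem
  have h2 : 0 < cards.length := List.length_pos_of_mem hmem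
  omega

-- ===== PORT B =====
-- diff = 0; for c in sorted(cards): diff = c - diff; then signed by is_alice.
def calc_py_alt (cards : List Int) (alice : Int) (bob : Int) (is_alice : Bool) : Int :=
  let diff := (PySem.List.sorted cards (fun x => x) false).foldl (fun d c => c - d) 0
  alice - bob + (if is_alice then diff else -diff)

-- ===== PRECONDITION & SPEC =====
-- Pre_ excludes exactly the empty list, on which A's max([]) raises ValueError.
def Pre_calc_py (cards : List Int) (alice : Int) (bob : Int) (is_alice : Bool) : Prop := cards ≠ []
instance (cards : List Int) (alice : Int) (bob : Int) (is_alice : Bool) : Decidable (Pre_calc_py cards alice bob is_alice) := by unfold Pre_calc_py; infer_instance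
def pvWitness_calc_py : List Int × Int × Int × Bool := ([3, 1, 7, 2], 0, 0, true)

def Spec_calc_py (cards : List Int) (alice : Int) (bob : Int) (is_alice : Bool) (out : Int) : Prop := out = calc_py_alt cards alice bob is_alice
instance (cards : List Int) (alice : Int) (bob : Int) (is_alice : Bool) (out : Int) : Decidable (Spec_calc_py cards alice bob is_alice out) := by unfold Spec_calc_py; infer_instance

-- ===== CLAIM (what is proved, stated in full; the proofs are below) =====
def Claim_equal_calc_py : Prop := ∀ (cards : List Int) (alice : Int) (bob : Int) (is_alice : Bool), Dom_calc_py cards alice bob is_alice → Pre_calc_py cards alice bob is_alice → Spec_calc_py cards alice bob is_alice (calc_py cards alice bob is_alice)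
-- ===== LEMMAS AND PROOFS =====

-- B's loop value on the ascending sort, as a function of the list.
def pvG (xs : List Int) : Int := xs.foldl (fun d c => c - d) 0

theorem pvG_append (xs : List Int) (m : Int) : pvG (xs ++ [m]) = m - pvG xs := by
  simp [pvG, List.foldl_append]

-- The ascending sort of a nonempty list is the ascending sort of (erase max) with max appended.
theorem sorted_erase_max (cards : List Int) (m : Int)
    (hm : PySem.List.max? cards (fun x => x) = some m) :
    PySem.List.sorted cards (fun x => x) false =
      PySem.List.sorted (cards.erase m) (fun x => x) false ++ [m] := by
  have hmem : m ∈ cards := PySem.List.max?_mem hm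
  have hmax : ∀ y ∈ cards, y ≤ m := by
    intro y hy; simpa using PySem.List.max?_isMax hm y hy
  apply PySem.List.sorted_id_eq_of_perm_of_pairwise
  · have p1 : (PySem.List.sorted (cards.erase m) (fun x => x) false ++ [m]).Perm
        (cards.erase m ++ [m]) :=
      (PySem.List.sorted_perm _ _ _).append (List.Perm.refl _)
    have p2 : (cards.erase m ++ [m]).Perm (m :: cards.erase m) :=
      List.perm_append_singleton m (cards.erase m)
    exact (p1.trans p2).trans (List.perm_cons_erase hmem).symm
  · rw [List.pairwise_append]
    refine ⟨?_, List.pairwise_singleton _ _, ?_⟩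
    · have := PySem.List.sorted_pairwise (xs := cards.erase m) (key := fun x => x)
      simpa using this
    · intro a ha b hb
      rw [List.mem_singleton] at hb
      rw [hb]
      have hmem' : a ∈ cards.erase m := (PySem.List.mem_sorted _ _ _ _).mp ha
      exact hmax a (List.mem_of_mem_erase hmem')

-- Main invariant: A's recursion computes a-b plus the signed alternating sum of the sort.
theorem calc_py_eq (cards : List Int) (alice bob : Int) (is_alice : Bool) (h : cards ≠ []) :
    calc_py cards alice bob is_alice =
      alice - bob + (if is_alice then pvG (PySem.List.sorted cards (fun x => x) false)
                     else -pvG (PySem.List.sorted cards (fun x => x) false)) := by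
  induction hn : cards.length using Nat.strong_induction_on generalizing cards alice bob is_alice with
  | _ n ih =>
  obtain ⟨m, hm⟩ : ∃ m, PySem.List.max? cards (fun x => x) = some m := by
    cases hmx : PySem.List.max? cards (fun x => x) with
    | none => exact absurd ((PySem.List.max?_eq_none_iff cards (fun x => x)).mp hmx) h
    | some m => exact ⟨m, rfl⟩
  have hmem : m ∈ cards := PySem.List.max?_mem hm
  have hr : PySem.List.remove? cards m = some (cards.erase m) :=
    PySem.List.remove?_eq_some_erase cards m hmem
  have hlen : (cards.erase m).length < cards.length := by
    have h1 : (cards.erase m).length = cards.length - 1 := List.length_erase_of_mem hmem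
    have h2 : 0 < cards.length := List.length_pos_of_mem hmem
    omega
  have hs := sorted_erase_max cards m hm
  rw [calc_py]
  split
  · next heq => rw [hm] at heq; simp at heq
  · next card heq =>
    rw [hm] at heq
    obtain rfl : card = m := (Option.some.injEq _ _ ▸ heq).symm
    split
    · next heq2 => rw [hr] at heq2; simp at heq2
    · next rest heq2 =>
      rw [hr] at heq2
      obtain rfl : rest = cards.erase card := (Option.some.injEq _ _ ▸ heq2).symm
      by_cases he : (cards.erase card).length ≠ 0
      · rw [if_pos he]
        have hne : cards.erase card ≠ [] := by
          intro hnil; exact he (by simp [hnil])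
        rw [ih (cards.erase card).length (hn ▸ hlen) (cards.erase card) _ _ _ hne rfl]
        rw [hs, pvG_append]
        cases is_alice <;> simp <;> ring
      · rw [if_neg he]
        have hnil : cards.erase card = [] := List.length_eq_zero_iff.mp (not_not.mp he)
        rw [hs, hnil, pvG_append]
        have hz : pvG (PySem.List.sorted ([] : List Int) (fun x => x) false) = 0 := rfl
        cases is_alice <;> simp [hz] <;> ring

-- ===== VERDICT (by name: the statement is the Claim_ definition above) =====
theorem calc_py_spec : Claim_equal_calc_py := by
  intro cards alice bob is_alice _ hpre
  unfold Spec_calc_py calc_py_alt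
  exact calc_py_eq cards alice bob is_alice hpre
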